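-- pv_equiv track=rewrite | github.com/YuCheng21/nkust-genetic-algorithm | Quiz/Quiz_5.py | quiz_5
-- ===== SOURCE A (Python) =====
-- def quiz_5(array):
--     length = len(array)
--     if length == 1:
--         return array[0]
--     if length == 2:
--         return max(array[0], array[1])
--
--     dist = [array[0], array[1]]
--     count = 2
--     while count < length:
--         dist.append(array[count] + max(dist[:-1]))
--         count += 1
--
--     return max(dist)
-- ===== SOURCE B (Python) =====
-- def quiz_5(array):
--     if len(array) == 1:
--         return array[0]
--     if len(array) == 2:
--         return max(array[0], array[1])
--     best, prev = array[0], array[1]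
--     for x in array[2:]:
--         best, prev = max(best, prev), x + best
--     return max(best, prev)
-- ===== Notes on version B (the rewrite author's own statement) =====
-- stated objective: faster
-- what changed: Replaces the growing dist list with repeated max(dist[:-1]) rescans by a single pass carrying two scalars (running max of all-but-last entries, and the last entry), so no list is built and no rescans happen.
import Mathlib
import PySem

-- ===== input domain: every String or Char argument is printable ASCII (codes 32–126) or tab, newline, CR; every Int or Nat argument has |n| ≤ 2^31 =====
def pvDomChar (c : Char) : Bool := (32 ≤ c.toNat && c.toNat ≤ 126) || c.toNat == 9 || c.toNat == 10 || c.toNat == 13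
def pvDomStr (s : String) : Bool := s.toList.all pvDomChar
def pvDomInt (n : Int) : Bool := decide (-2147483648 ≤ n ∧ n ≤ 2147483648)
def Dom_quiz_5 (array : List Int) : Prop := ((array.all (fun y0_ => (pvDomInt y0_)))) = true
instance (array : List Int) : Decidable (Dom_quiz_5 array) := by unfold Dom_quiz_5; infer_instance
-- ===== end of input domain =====

-- B replaces A's quadratic rescan of max(dist[:-1]) over a growing list by a single
-- pass carrying two scalars (running max of all-but-last, and the last entry); faster (asymptotic).


-- ===== PORT A =====
-- the while loop: dist.append(array[count] + max(dist[:-1])); count += 1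
-- (.getD 0 marks Python raise points: pyGet? out of range / max of empty never occur under Pre_)
def quiz5_loop (array : List Int) (length : Nat) (count : Nat) (dist : List Int) : List Int :=
  if count < length then
    quiz5_loop array length (count + 1)
      (dist ++ [(PySem.List.pyGet? array (count : Int)).getD 0 +
                (PySem.List.max? (PySem.List.slice dist none (some (-1))) (fun y => y)).getD 0])
  else dist
termination_by length - count

def quiz_5 (array : List Int) : Int :=
  let length := array.length
  if length == 1 then (PySem.List.pyGet? array 0).getD 0
  else if length == 2 then
    max ((PySem.List.pyGet? array 0).getD 0) ((PySem.List.pyGet? array 1).getD 0)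
  else
    let dist := [(PySem.List.pyGet? array 0).getD 0, (PySem.List.pyGet? array 1).getD 0]
    (PySem.List.max? (quiz5_loop array length 2 dist) (fun y => y)).getD 0

-- ===== PORT B =====
-- the for loop: best, prev = max(best, prev), x + best; then return max(best, prev)
def quiz5AltLoop : List Int → Int → Int → Int
  | [], best, prev => max best prev
  | x :: rest, best, prev => quiz5AltLoop rest (max best prev) (x + best)

def quiz_5_alt (array : List Int) : Int :=
  if array.length == 1 then (PySem.List.pyGet? array 0).getD 0
  else if array.length == 2 then
    max ((PySem.List.pyGet? array 0).getD 0) ((PySem.List.pyGet? array 1).getD 0)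
  else
    quiz5AltLoop (PySem.List.slice array (some 2) none)
      ((PySem.List.pyGet? array 0).getD 0) ((PySem.List.pyGet? array 1).getD 0)

-- ===== PRECONDITION & SPEC =====
-- Pre_ excludes only the empty list, on which A (and B) raise IndexError when indexing the first element.
def Pre_quiz_5 (array : List Int) : Prop := array ≠ []
instance (array : List Int) : Decidable (Pre_quiz_5 array) := by unfold Pre_quiz_5; infer_instance
def pvWitness_quiz_5 : List Int := ([3, -1, 4, 1, 5])

def Spec_quiz_5 (array : List Int) (out : Int) : Prop := out = quiz_5_alt array
instance (array : List Int) (out : Int) : Decidable (Spec_quiz_5 array out) := by unfold Spec_quiz_5; infer_instance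

-- ===== CLAIM (what is proved, stated in full; the proofs are below) =====
def Claim_equal_quiz_5 : Prop := ∀ (array : List Int), Dom_quiz_5 array → Pre_quiz_5 array → Spec_quiz_5 array (quiz_5 array)

-- ===== LEMMAS AND PROOFS =====

-- loop invariant: dist = x0 :: ds ++ [last]; best = running max of dist[:-1], prev = last
lemma quiz5_loop_eq (rest : List Int) : ∀ (pre ds : List Int) (x0 last : Int),
    (PySem.List.max? (quiz5_loop (pre ++ rest) (pre ++ rest).length pre.length (x0 :: ds ++ [last]))
      (fun y => y)).getD 0
    = quiz5AltLoop rest (ds.foldl max x0) last := by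
  induction rest with
  | nil =>
    intro pre ds x0 last
    rw [quiz5_loop]
    simp [quiz5AltLoop, PySem.List.max?_id_cons, List.foldl_append]
  | cons x rest ih =>
    intro pre ds x0 last
    rw [quiz5_loop]
    have hlt : pre.length < (pre ++ x :: rest).length := by simp
    rw [if_pos hlt]
    have hget : PySem.List.pyGet? (pre ++ x :: rest) (pre.length : Int) = some x :=
      PySem.List.pyGet?_append_length pre rest x
    rw [hget]
    have hsl : PySem.List.slice (x0 :: ds ++ [last]) none (some (-1)) = x0 :: ds := by
      rw [PySem.List.slice_to_neg_one]
      exact List.dropLast_concat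
    rw [hsl, PySem.List.max?_id_cons]
    have harr : pre ++ x :: rest = (pre ++ [x]) ++ rest := by simp
    have hcnt : pre.length + 1 = (pre ++ [x]).length := by simp
    simp only [Option.getD_some]
    rw [harr, hcnt]
    have step := ih (pre ++ [x]) (ds ++ [last]) x0 (x + ds.foldl max x0)
    simpa [quiz5AltLoop, List.foldl_append] using step

-- ===== VERDICT (by name: the statement is the Claim_ definition above) =====
theorem quiz_5_spec : Claim_equal_quiz_5 := by
  intro array _ hpre
  unfold Spec_quiz_5
  match array, hpre with
  | [a], _ => rfl
  | [a, b], _ => rfl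
  | a :: b :: c :: rest, _ =>
    show quiz_5 (a :: b :: c :: rest) = quiz_5_alt (a :: b :: c :: rest)
    unfold quiz_5 quiz_5_alt
    have h1 : ((a :: b :: c :: rest).length == 1) = false := by simp
    have h2 : ((a :: b :: c :: rest).length == 2) = false := by simp
    simp only [h1, h2, if_false, Bool.false_eq_true]
    have hsl : PySem.List.slice (a :: b :: c :: rest) (some 2) none = c :: rest := by
      rw [show (2 : Int) = ((2 : Nat) : Int) from rfl, PySem.List.slice_from_natCast]
      rfl
    have g0 : (PySem.List.pyGet? (a :: b :: c :: rest) 0).getD 0 = a := by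
      rw [show (0 : Int) = ((0 : Nat) : Int) from rfl, PySem.List.pyGet?_natCast]
      rfl
    have g1 : (PySem.List.pyGet? (a :: b :: c :: rest) 1).getD 0 = b := by
      rw [show (1 : Int) = ((1 : Nat) : Int) from rfl, PySem.List.pyGet?_natCast]
      rfl
    rw [hsl, g0, g1]
    have key := quiz5_loop_eq (c :: rest) [a, b] [] a b
    simp only [List.length_cons, List.length_nil, List.foldl_nil,
      List.cons_append, List.nil_append] at key ⊢
    exact key
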